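-- pv_equiv track=rewrite | github.com/enqiLi/cs229230project | mytokenize.py | get_string_tokens
-- ===== SOURCE A (Python) =====
-- usual_commands = ["in", "Spec", "mathcal", "mathbf", "xymatrix", "ar", "times", "text", "otimes", "oplus", "bigoplus", "circ", "Hom", "Ext", "cap", "cup", "prod", "coprod", "beta", "gamma", "delta", "Delta", "lambda", "varphi", "psi", "theta", "Theta", "omega", "Omega", "sigma", "pi", "Pi", "rho", "cdots"]
--
-- def get_string_tokens(str):
--     tokens = []
--     # command_index = {}
--     index_command = {}
--     for command in usual_commands:
--         # trick obtained from here https://datagy.io/python-find-index-substring/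
--         indices = [index for index in range(len(str)) if str.startswith(command, index)]
--         # command_index[command] = indices
--         for index in indices:
--             index_command[index] = command
--     idx = 0
--     while idx < len(str):
--         if idx in index_command:
--             tokens.append(index_command[idx])
--             idx += len(index_command[idx])
--         else:
--             tokens.append(str[idx])
--             idx += 1
--     return tokens
-- ===== SOURCE B (Python) =====
-- usual_commands = ["in", "Spec", "mathcal", "mathbf", "xymatrix", "ar", "times", "text", "otimes", "oplus", "bigoplus", "circ", "Hom", "Ext", "cap", "cup", "prod", "coprod", "beta", "gamma", "delta", "Delta", "lambda", "varphi", "psi", "theta", "Theta", "omega", "Omega", "sigma", "pi", "Pi", "rho", "cdots"]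
--
-- def get_string_tokens(str):
--     tokens = []
--     n = len(str)
--     idx = 0
--     while idx < n:
--         match = None
--         for command in usual_commands:
--             if str.startswith(command, idx):
--                 match = command
--         if match is None:
--             tokens.append(str[idx])
--             idx += 1
--         else:
--             tokens.append(match)
--             idx += len(match)
--     return tokens
-- ===== Notes on version B (the rewrite author's own statement) =====
-- stated objective: simpler
-- what changed: Dropped A's whole precomputation phase (per-command index lists and the index->command dict): B is a single while-loop that at each position scans usual_commands keeping the last match, preserving A's later-command-wins tie-break.
import Mathlib
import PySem

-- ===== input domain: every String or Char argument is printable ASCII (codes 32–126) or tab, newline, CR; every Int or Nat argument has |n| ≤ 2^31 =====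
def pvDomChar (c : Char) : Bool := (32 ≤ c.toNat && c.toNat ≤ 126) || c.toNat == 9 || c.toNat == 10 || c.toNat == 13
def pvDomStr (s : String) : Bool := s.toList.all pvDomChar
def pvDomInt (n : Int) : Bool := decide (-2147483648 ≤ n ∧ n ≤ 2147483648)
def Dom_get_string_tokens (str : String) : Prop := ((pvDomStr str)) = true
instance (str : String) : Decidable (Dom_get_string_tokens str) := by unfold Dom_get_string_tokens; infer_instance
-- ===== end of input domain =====

-- B replaces A's precomputed index→command dict by a single in-place scan that, at each
-- position, takes the LAST matching command from usual_commands (objective: simpler).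

-- ===== PORT A =====
def usualCommands : List String := ["in", "Spec", "mathcal", "mathbf", "xymatrix", "ar", "times", "text", "otimes", "oplus", "bigoplus", "circ", "Hom", "Ext", "cap", "cup", "prod", "coprod", "beta", "gamma", "delta", "Delta", "lambda", "varphi", "psi", "theta", "Theta", "omega", "Omega", "sigma", "pi", "Pi", "rho", "cdots"]

-- str.startswith(command, i) for a natural index i (exact: Python's start clamps at 0 for i ≥ 0)
def startsAt (cs : List Char) (c : String) (i : Nat) : Bool :=
  PySem.Chars.startswith (cs.drop i) c.toList

-- the 'for command in usual_commands: … for index in indices: index_command[index] = command' phase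
def buildIndexCommand (cs : List Char) : PySem.Dict Nat String :=
  usualCommands.foldl (fun d command =>
    ((List.range cs.length).filter (fun index => startsAt cs command index)).foldl
      (fun d index => d.insert index command) d)
    PySem.Dict.empty

-- the 'while idx < len(str)' loop; fuel = len(str) suffices since every step advances idx by ≥ 1
def aLoop (cs : List Char) (d : PySem.Dict Nat String) (idx fuel : Nat) : List String :=
  match fuel with
  | 0 => []
  | fuel + 1 =>
    if idx < cs.length then
      match d.get? idx with
      | some c => c :: aLoop cs d (idx + c.length) fuel
      | none   => String.mk [cs.getD idx ' '] :: aLoop cs d (idx + 1) fuel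
    else []

def get_string_tokens (str : String) : List String :=
  aLoop str.toList (buildIndexCommand str.toList) 0 str.toList.length

-- ===== PORT B =====
-- last command in usual_commands matching at position i (None if none matches)
def lastMatch (cs : List Char) (i : Nat) : Option String :=
  usualCommands.foldl (fun acc command =>
    if startsAt cs command i then some command else acc) none

def bLoop (cs : List Char) (idx fuel : Nat) : List String :=
  match fuel with
  | 0 => []
  | fuel + 1 =>
    if idx < cs.length then
      match lastMatch cs idx with
      | some c => c :: bLoop cs (idx + c.length) fuel
      | none   => String.mk [cs.getD idx ' '] :: bLoop cs (idx + 1) fuel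
    else []

def get_string_tokens_alt (str : String) : List String :=
  bLoop str.toList 0 str.toList.length

-- ===== PRECONDITION & SPEC =====
def Spec_get_string_tokens (str : String) (out : List String) : Prop := out = get_string_tokens_alt str
instance (str : String) (out : List String) : Decidable (Spec_get_string_tokens str out) := by unfold Spec_get_string_tokens; infer_instance

-- ===== CLAIM (what is proved, stated in full; the proofs are below) =====
def Claim_equal_get_string_tokens : Prop := ∀ (str : String), Dom_get_string_tokens str → Spec_get_string_tokens str (get_string_tokens str)

-- ===== LEMMAS AND PROOFS =====

-- inserting the same value at every index of a list; lookup afterwards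
lemma get?_foldl_insert (c : String) (l : List Nat) (d : PySem.Dict Nat String) (i : Nat) :
    (l.foldl (fun d j => d.insert j c) d).get? i = if i ∈ l then some c else d.get? i := by
  induction l generalizing d with
  | nil => simp
  | cons j l ih =>
    simp only [List.foldl_cons, ih, List.mem_cons, PySem.Dict.get?_insert]
    by_cases h : i ∈ l <;> by_cases h' : i = j <;> simp [h, h']

-- the dict built by A answers, at any in-range index, with the last matching command
lemma build_get? (cs : List Char) (cmds : List String) (d : PySem.Dict Nat String)
    (i : Nat) (hi : i < cs.length) :
    (cmds.foldl (fun d command =>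
        ((List.range cs.length).filter (fun index => startsAt cs command index)).foldl
          (fun d index => d.insert index command) d) d).get? i
      = cmds.foldl (fun acc command => if startsAt cs command i then some command else acc)
          (d.get? i) := by
  induction cmds generalizing d with
  | nil => rfl
  | cons c cmds ih =>
    simp only [List.foldl_cons, ih]
    congr 1
    rw [get?_foldl_insert]
    simp [List.mem_filter, List.mem_range, hi]

lemma buildIndexCommand_get? (cs : List Char) (i : Nat) (hi : i < cs.length) :
    (buildIndexCommand cs).get? i = lastMatch cs i := by
  unfold buildIndexCommand lastMatch
  rw [build_get? cs usualCommands PySem.Dict.empty i hi]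
  simp [PySem.Dict.get?_empty]

lemma aLoop_eq_bLoop (cs : List Char) (fuel idx : Nat) :
    aLoop cs (buildIndexCommand cs) idx fuel = bLoop cs idx fuel := by
  induction fuel generalizing idx with
  | zero => rfl
  | succ fuel ih =>
    unfold aLoop bLoop
    by_cases h : idx < cs.length
    · simp only [h, if_true, buildIndexCommand_get? cs idx h]
      cases lastMatch cs idx <;> simp [ih]
    · simp [h]

-- ===== VERDICT (by name: the statement is the Claim_ definition above) =====
theorem get_string_tokens_spec : Claim_equal_get_string_tokens := by
  intro str _
  unfold Spec_get_string_tokens get_string_tokens get_string_tokens_alt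
  exact aLoop_eq_bLoop str.toList str.toList.length 0
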